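-- pv_equiv track=rewrite | github.com/nickmyatt/codility | leader/equi_leader.py | prefix_leader
-- ===== SOURCE A (Python) =====
-- from collections import defaultdict
--
-- def prefix_leader(seq):
--     occurrences = defaultdict(int)
--     leaders = []
--     candidate = None
--     depth = 0
--     for length, elem in enumerate(seq, 1):
--         if depth > 0:
--             if elem == candidate:
--                 depth += 1
--             else:
--                 depth -= 1
--         else:
--             candidate = elem
--             depth = 1
--         occurrences[elem] += 1
--         if occurrences[candidate] > length // 2:
--             leaders.append(candidate)
--         else:
--             leaders.append(None)
--     return leaders
-- ===== SOURCE B (Python) =====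
-- def prefix_leader(seq):
--     # Sorted-median check per prefix: if a prefix has a majority element, it
--     # must sit at the middle index of the sorted prefix; verify by counting.
--     res = []
--     for i in range(1, len(seq) + 1):
--         pre = seq[:i]
--         m = sorted(pre)[i // 2]
--         res.append(m if pre.count(m) > i // 2 else None)
--     return res
-- ===== Notes on version B (the rewrite author's own statement) =====
-- stated objective: alternative
-- what changed: Replaced Boyer-Moore voting with a dict by a per-prefix sorted-median check: the majority of a prefix, if it exists, must be the middle element of the sorted prefix, which is then verified by counting.
import Mathlib
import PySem

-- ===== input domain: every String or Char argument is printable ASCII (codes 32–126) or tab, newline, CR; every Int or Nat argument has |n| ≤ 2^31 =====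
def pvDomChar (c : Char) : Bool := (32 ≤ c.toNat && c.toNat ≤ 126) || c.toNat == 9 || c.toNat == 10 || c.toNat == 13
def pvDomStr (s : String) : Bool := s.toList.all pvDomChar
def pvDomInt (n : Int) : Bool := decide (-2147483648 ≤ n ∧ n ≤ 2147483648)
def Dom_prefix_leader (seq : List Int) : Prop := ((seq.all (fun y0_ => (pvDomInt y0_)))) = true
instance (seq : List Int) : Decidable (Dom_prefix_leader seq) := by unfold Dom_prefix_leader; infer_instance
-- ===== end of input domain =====

-- B replaces A's incremental Boyer–Moore voting (candidate/depth + occurrence dict) by a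
-- per-prefix sorted-median check (the majority of a prefix, if any, must be the middle
-- element of the sorted prefix); alternative algorithm, return values proved equal.

-- ===== PORT A =====
-- loop of A as structural recursion over the remaining list; state = (occurrences, leaders, candidate, depth, length-so-far).
-- Python's `candidate` starts as None, hence Option Int; `occurrences[candidate]` is only
-- evaluated after `candidate` was set, so the `.getD 0` totalization is never reached.
def prefix_leader_go (rest : List Int) (occ : PySem.Dict Int Int) (leaders : List (Option Int))
    (candidate : Option Int) (depth : Int) (n : Int) : List (Option Int) :=
  match rest with
  | [] => leaders
  | elem :: rest =>
    let length := n + 1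
    let cd : Option Int × Int :=
      if 0 < depth then
        (if candidate = some elem then (candidate, depth + 1) else (candidate, depth - 1))
      else (some elem, 1)
    let occ := occ.insert elem (occ.getD elem 0 + 1)
    let out := if PySem.Int.floordiv length 2 < occ.getD (cd.1.getD 0) 0 then cd.1 else none
    prefix_leader_go rest occ (leaders ++ [out]) cd.1 cd.2 length

def prefix_leader (seq : List Int) : List (Option Int) :=
  prefix_leader_go seq PySem.Dict.empty [] none 0 0

-- ===== PORT B =====
-- Source B's loop `for i in range(1, len(seq)+1)` as a foldl over the Python range; each step
-- slices the prefix, sorts it and reads the middle element.  `sorted(pre)[i // 2]` always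
-- indexes in range (1 ≤ i, i//2 < i = len(pre)), so the `.getD 0` totalization of the
-- IndexError case is never reached.
def prefix_leader_alt (seq : List Int) : List (Option Int) :=
  (PySem.List.pyRange 1 ((seq.length : Int) + 1) 1).foldl
    (fun res i =>
      let pre := PySem.List.slice seq none (some i)
      let m := (PySem.List.pyGet? (PySem.List.sorted pre (fun x => x) false) (PySem.Int.floordiv i 2)).getD 0
      res ++ [if PySem.Int.floordiv i 2 < (PySem.List.count pre m : Int) then some m else none]) []

-- ===== PRECONDITION & SPEC =====
def Spec_prefix_leader (seq : List Int) (out : List (Option Int)) : Prop := out = prefix_leader_alt seq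
instance (seq : List Int) (out : List (Option Int)) : Decidable (Spec_prefix_leader seq out) := by unfold Spec_prefix_leader; infer_instance

-- ===== CLAIM (what is proved, stated in full; the proofs are below) =====
def Claim_equal_prefix_leader : Prop := ∀ (seq : List Int), Dom_prefix_leader seq → Spec_prefix_leader seq (prefix_leader seq)

-- ===== LEMMAS AND PROOFS =====

-- the unique majority (> half) element of a list, if any, as the first element satisfying it
def pick (pre : List Int) : Option Int :=
  pre.find? (fun x => decide ((pre.length : Int) < 2 * (pre.count x : Int)))

-- "o is the majority verdict of pre"
def IsMaj (pre : List Int) (o : Option Int) : Prop :=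
  (∀ l : Int, o = some l → (pre.length : Int) < 2 * (pre.count l : Int)) ∧
  (o = none → ∀ x : Int, 2 * (pre.count x : Int) ≤ (pre.length : Int))

lemma count_add_le (l : List Int) (a b : Int) (h : a ≠ b) :
    (l.count a : Int) + (l.count b : Int) ≤ (l.length : Int) := by
  have : l.count a + l.count b ≤ l.length := by
    induction l with
    | nil => simp
    | cons y t ih =>
      simp only [List.count_cons, List.length_cons]
      rcases eq_or_ne y a with rfl | ha <;> rcases eq_or_ne y b with rfl | hb <;>
        simp_all <;> omega
  exact_mod_cast this

lemma pick_isMaj (pre : List Int) : IsMaj pre (pick pre) := by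
  constructor
  · intro l hl
    have := List.find?_some (by rw [← hl]; rfl : pre.find? (fun x => decide ((pre.length : Int) < 2 * (pre.count x : Int))) = some l)
    simpa using this
  · intro hn x
    unfold pick at hn
    by_cases hx : x ∈ pre
    · have := List.find?_eq_none.mp hn x hx
      simp at this
      omega
    · have : pre.count x = 0 := List.count_eq_zero.mpr hx
      simp [this]
lemma isMaj_unique (pre : List Int) (o1 o2 : Option Int)
    (h1 : IsMaj pre o1) (h2 : IsMaj pre o2) : o1 = o2 := by
  obtain ⟨h1s, h1n⟩ := h1
  obtain ⟨h2s, h2n⟩ := h2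
  match o1, o2 with
  | none, none => rfl
  | none, some l => have := h1n rfl l; have := h2s l rfl; omega
  | some l, none => have := h2n rfl l; have := h1s l rfl; omega
  | some a, some b =>
    rcases eq_or_ne a b with rfl | hne
    · rfl
    · have := h1s a rfl
      have := h2s b rfl
      have := count_add_le pre a b hne
      omega

-- THE MEDIAN LEMMA: a majority element sits at the middle index of any sorted rearrangement
lemma median_generic (pre s : List Int) (x : Int) (hperm : s.Perm pre)
    (hmono : ∀ (p q : Nat) (hpq : p ≤ q) (hq : q < s.length), s[p]'(Nat.lt_of_le_of_lt hpq hq) ≤ s[q]'hq)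
    (hm : (pre.length : Int) < 2 * (pre.count x : Int))
    (hk : pre.length / 2 < s.length) :
    s[pre.length / 2]'hk = x := by
  have hlen : s.length = pre.length := hperm.length_eq
  have hcnt : s.count x = pre.count x := hperm.count_eq x
  have hcN : pre.length < 2 * pre.count x := by exact_mod_cast hm
  set k := pre.length / 2 with hkdef
  have hkn : 2 * k ≤ pre.length ∧ pre.length ≤ 2 * k + 1 := by omega
  by_contra hne
  rcases lt_trichotomy (s[k]'(hk)) x with hlt | heq | hgt
  · -- s[k] < x : x lives entirely in s.drop (k+1)
    have hx_nottake : x ∉ s.take (k + 1) := by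
      intro hmem
      obtain ⟨i, hi, hval⟩ := List.getElem_of_mem hmem
      rw [List.getElem_take] at hval
      have hik : i ≤ k := by
        have := hi
        simp [List.length_take] at this
        omega
      have := hmono i k hik hk
      rw [hval] at this
      omega
    have hsplit : s.count x = (s.take (k+1)).count x + (s.drop (k+1)).count x := by
      conv_lhs => rw [← List.take_append_drop (k+1) s]
      rw [List.count_append]
    have h1 : (s.take (k+1)).count x = 0 := List.count_eq_zero.mpr hx_nottake
    have h2 : (s.drop (k+1)).count x ≤ s.length - (k+1) := by
      calc (s.drop (k+1)).count x ≤ (s.drop (k+1)).length := List.count_le_length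
        _ = s.length - (k+1) := List.length_drop
    omega
  · exact hne heq
  · -- x < s[k] : x lives entirely in s.take k
    have hx_notdrop : x ∉ s.drop k := by
      intro hmem
      obtain ⟨i, hi, hval⟩ := List.getElem_of_mem hmem
      rw [List.getElem_drop] at hval
      have hle : k ≤ k + i := by omega
      have hki : k + i < s.length := by
        have := hi; simp [List.length_drop] at this; omega
      have := hmono k (k + i) hle hki
      rw [hval] at this
      omega
    have hsplit : s.count x = (s.take k).count x + (s.drop k).count x := by
      conv_lhs => rw [← List.take_append_drop k s]
      rw [List.count_append]
    have h1 : (s.drop k).count x = 0 := List.count_eq_zero.mpr hx_notdrop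
    have h2 : (s.take k).count x ≤ k := by
      calc (s.take k).count x ≤ (s.take k).length := List.count_le_length
        _ ≤ k := by simp [List.length_take]
    omega

-- ---------- B-side: the fold step computes pick of the prefix ----------

-- the per-index value of B's loop body, for index i = k+1 with k < seq.length
lemma altBody_eq_pick (seq : List Int) (k : Nat) (hk : k < seq.length) :
    (let pre := PySem.List.slice seq none (some ((k : Int) + 1))
     let m := (PySem.List.pyGet? (PySem.List.sorted pre (fun x => x) false) (PySem.Int.floordiv ((k : Int) + 1) 2)).getD 0
     if PySem.Int.floordiv ((k : Int) + 1) 2 < (PySem.List.count pre m : Int) then some m else none)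
      = pick (seq.take (k + 1)) := by
  have hcast : (k : Int) + 1 = ((k + 1 : Nat) : Int) := by push_cast; ring
  rw [hcast, PySem.List.slice_to_natCast]
  set pre := seq.take (k + 1) with hpre
  have hlenpre : pre.length = k + 1 := by
    rw [hpre, List.length_take]; omega
  have hfd : PySem.Int.floordiv ((k + 1 : Nat) : Int) 2 = (((k+1) / 2 : Nat) : Int) := by
    exact_mod_cast PySem.Int.floordiv_natCast (k+1) 2
  rw [hfd]
  have hks : (k+1)/2 < (PySem.List.sorted pre (fun x => x) false).length := by
    rw [PySem.List.length_sorted, hlenpre]; omega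
  have hget : PySem.List.pyGet? (PySem.List.sorted pre (fun x => x) false) (((k+1) / 2 : Nat) : Int)
      = some ((PySem.List.sorted pre (fun x => x) false)[(k+1)/2]'hks) := by
    rw [PySem.List.pyGet?_natCast, List.getElem?_eq_getElem hks]
  simp only [hget, Option.getD_some, PySem.List.count_eq]
  set m := (PySem.List.sorted pre (fun x => x) false)[(k+1)/2]'hks with hm
  -- the branch value is the majority verdict; conclude by uniqueness against pick
  have hIs : IsMaj pre (if (((k+1) / 2 : Nat) : Int) < (pre.count m : Int) then some m else none) := by
    constructor
    · intro l hl
      split at hl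
      · rename_i hcond
        injection hl with hl; subst hl
        rw [hlenpre]
        push_cast at hcond ⊢
        omega
      · exact absurd hl (by simp)
    · intro hnone x
      split at hnone
      · exact absurd hnone (by simp)
      · rename_i hcond
        by_contra habs
        rw [not_le] at habs
        have hmed : (PySem.List.sorted pre (fun y => y) false)[pre.length / 2]'(by rw [PySem.List.length_sorted]; omega) = x :=
          median_generic pre _ x (PySem.List.sorted_perm pre _ _)
            (fun p q hpq hq => PySem.List.sorted_id_getElem_mono pre hpq hq) habs
            (by rw [PySem.List.length_sorted]; omega)
        have hmx : m = x := by
          rw [hm, ← hmed]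
          congr 1
          omega
        refine hcond ?_
        rw [hmx]
        have habsN : pre.length < 2 * pre.count x := by exact_mod_cast habs
        exact_mod_cast (by omega : (k+1)/2 < pre.count x)
  exact isMaj_unique pre _ _ hIs (pick_isMaj pre)

-- the table of pick-values over growing prefixes, shaped like the loops' recursion
def specList : List Int → List Int → List (Option Int)
  | _, [] => []
  | done, e :: r => pick (done ++ [e]) :: specList (done ++ [e]) r

lemma specList_eq_map (rest : List Int) : ∀ (done : List Int),
    specList done rest = (List.range rest.length).map (fun k => pick (done ++ rest.take (k + 1))) := by
  induction rest with
  | nil => intro done; simp [specList]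
  | cons e r ih =>
    intro done
    simp only [specList, List.length_cons, List.range_succ_eq_map, List.map_cons, List.map_map]
    congr 1
    rw [ih (done ++ [e])]
    apply List.map_congr_left
    intro k _
    simp [Function.comp, List.append_assoc]

lemma alt_eq_specList (seq : List Int) : prefix_leader_alt seq = specList [] seq := by
  unfold prefix_leader_alt
  have hr : PySem.List.pyRange 1 ((seq.length : Int) + 1) 1
      = (List.range seq.length).map (fun k : Nat => 1 + (k : Int)) := by
    have ht : ((seq.length : Int) + 1 - 1).toNat = seq.length := by omega
    rw [PySem.List.pyRange_one, ht]
  rw [hr]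
  -- the loop body is `res ++ [F i]` (up to zeta); fold it away with the library lemma
  refine Eq.trans (b := ((List.range seq.length).map (fun k : Nat => 1 + (k : Int))).map
      (fun i : Int =>
        let pre := PySem.List.slice seq none (some i)
        let m := (PySem.List.pyGet? (PySem.List.sorted pre (fun x => x) false) (PySem.Int.floordiv i 2)).getD 0
        if PySem.Int.floordiv i 2 < (PySem.List.count pre m : Int) then some m else none)) ?_ ?_
  · exact (PySem.List.foldl_append_singleton_eq_map _ _ []).trans (List.nil_append _)
  · rw [specList_eq_map, List.map_map]
    apply List.map_congr_left
    intro k hk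
    rw [List.mem_range] at hk
    have h1 : (1 : Int) + (k : Int) = (k : Int) + 1 := by ring
    simp only [Function.comp, h1]
    simpa using altBody_eq_pick seq k hk

-- ---------- A-side: the Boyer–Moore invariant ----------

def InvA (done : List Int) (cand : Option Int) (depth : Int) : Prop :=
  0 ≤ depth ∧
  (depth = 0 → ∀ x : Int, 2 * (done.count x : Int) ≤ (done.length : Int)) ∧
  (0 < depth → ∃ c : Int, cand = some c ∧ 2 * (done.count c : Int) ≤ (done.length : Int) + depth ∧
    ∀ x : Int, x ≠ c → 2 * (done.count x : Int) ≤ (done.length : Int) - depth)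

lemma cnt_append (done : List Int) (elem x : Int) :
    (((done ++ [elem]).count x : Nat) : Int) = (done.count x : Int) + if x = elem then 1 else 0 := by
  simp [List.count_append, List.count_singleton']
  split <;> rename_i h <;> simp at * <;> omega

lemma fd2' (k : Nat) (c : Int) :
    (PySem.Int.floordiv ((k : Int) + 1) 2 < c) ↔ ((k : Int) + 1 < 2 * c) := by
  rw [PySem.Int.floordiv_lt_iff_lt_mul (by norm_num)]
  omega

lemma stepA (done : List Int) (elem : Int) (cand : Option Int) (depth : Int)
    (h : InvA done cand depth) :
    InvA (done ++ [elem])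
      (if 0 < depth then cand else some elem)
      (if 0 < depth then (if cand = some elem then depth + 1 else depth - 1) else 1) := by
  obtain ⟨h0, hz, hp⟩ := h
  have hn : ((done ++ [elem]).length : Int) = (done.length : Int) + 1 := by simp
  by_cases hd : 0 < depth
  · obtain ⟨c, hc, hcb, hxb⟩ := hp hd
    by_cases he : cand = some elem
    · have hce : c = elem := by rw [hc] at he; exact Option.some.inj he
      subst hce
      refine ⟨by simpa [hd, he] using by omega, ?_, ?_⟩ <;> simp only [if_pos hd, if_pos he]
      · intro habs; omega
      · intro _
        refine ⟨c, hc, ?_, ?_⟩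
        · rw [hn, cnt_append]; simp; omega
        · intro x hx; rw [hn, cnt_append]; simp [hx]
          have := hxb x hx; omega
    · have hce : c ≠ elem := by rintro rfl; exact he hc
      refine ⟨?_, ?_, ?_⟩ <;> simp only [if_pos hd, if_neg he]
      · omega
      · intro hdz x
        rw [hn, cnt_append]
        rcases eq_or_ne x c with rfl | hxc
        · simp [hce]; omega
        · rcases eq_or_ne x elem with rfl | hxe
          · simp; have := hxb _ hxc; omega
          · simp [hxe]; have := hxb _ hxc; omega
      · intro hd1
        refine ⟨c, hc, ?_, ?_⟩
        · rw [hn, cnt_append]; simp [hce]; omega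
        · intro x hx
          rw [hn, cnt_append]
          rcases eq_or_ne x elem with rfl | hxe
          · simp; have := hxb _ hx; omega
          · simp [hxe]; have := hxb _ hx; omega
  · have hdz : depth = 0 := by omega
    have hall := hz hdz
    refine ⟨?_, ?_, ?_⟩ <;> simp only [if_neg hd]
    · omega
    · intro habs; omega
    · intro _
      refine ⟨elem, rfl, ?_, ?_⟩
      · rw [hn, cnt_append]; simp; have := hall elem; omega
      · intro x hx; rw [hn, cnt_append]; simp [hx]; have := hall x; omega

-- A's emitted output is the majority verdict, given the voting invariant and any IsMaj witness
lemma out_eq (done' : List Int) (cand' o : Option Int) (depth' : Int)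
    (hA : InvA done' cand' depth') (hB : IsMaj done' o) :
    (if (done'.length : Int) < 2 * (done'.count (cand'.getD 0) : Int) then cand' else none) = o := by
  obtain ⟨h0, hz, hp⟩ := hA
  obtain ⟨hs, hnone⟩ := hB
  match o, hs, hnone with
  | some l, hs, _ =>
    have hl := hs l rfl
    have hdp : 0 < depth' := by
      by_contra hd
      have := hz (by omega) l
      omega
    obtain ⟨c, hc, _, hxb⟩ := hp hdp
    have hlc : l = c := by
      by_contra hne
      have := hxb l hne
      omega
    subst hlc
    rw [hc]
    simp only [Option.getD_some]
    rw [if_pos hl]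
  | none, _, hnone =>
    rw [if_neg]
    have := hnone rfl (cand'.getD 0)
    omega

-- one-step unfolding of A's loop (reducing the pair projections)
lemma goA_cons (elem : Int) (rest : List Int) (occ : PySem.Dict Int Int)
    (acc : List (Option Int)) (cand : Option Int) (depth n : Int) :
    prefix_leader_go (elem :: rest) occ acc cand depth n =
      prefix_leader_go rest (occ.insert elem (occ.getD elem 0 + 1))
        (acc ++ [if PySem.Int.floordiv (n + 1) 2 <
              (occ.insert elem (occ.getD elem 0 + 1)).getD ((if 0 < depth then cand else some elem).getD 0) 0
            then (if 0 < depth then cand else some elem) else none])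
        (if 0 < depth then cand else some elem)
        (if 0 < depth then (if cand = some elem then depth + 1 else depth - 1) else 1)
        (n + 1) := by
  simp only [prefix_leader_go]
  by_cases hd : 0 < depth
  · by_cases he : cand = some elem <;> simp [hd, he]
  · simp [hd]

-- main A-side lemma: the loop emits exactly the pick-values of the growing prefixes
lemma goA_spec (rest : List Int) : ∀ (done : List Int) (occ : PySem.Dict Int Int)
    (acc : List (Option Int)) (cand : Option Int) (depth : Int),
    (∀ x : Int, occ.getD x 0 = (done.count x : Int)) →
    InvA done cand depth →
    prefix_leader_go rest occ acc cand depth (done.length : Int) = acc ++ specList done rest := by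
  induction rest with
  | nil => intros; simp [prefix_leader_go, specList]
  | cons elem rest ih =>
    intro done occ acc cand depth hocc invA
    have hn : ((done ++ [elem]).length : Int) = (done.length : Int) + 1 := by simp
    have hocc' : ∀ x : Int, (occ.insert elem (occ.getD elem 0 + 1)).getD x 0
        = (((done ++ [elem]).count x : Nat) : Int) := by
      intro x
      rw [PySem.Dict.getD_insert, cnt_append]
      split <;> rename_i hx <;> simp [hocc, hx]
    have invA' := stepA done elem cand depth invA
    rw [goA_cons]
    simp only [hocc', fd2']
    have hout := out_eq (done ++ [elem]) _ (pick (done ++ [elem])) _ invA' (pick_isMaj _)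
    rw [hn] at hout
    rw [hout]
    have key := ih (done ++ [elem]) (occ.insert elem (occ.getD elem 0 + 1))
      (acc ++ [pick (done ++ [elem])])
      (if 0 < depth then cand else some elem)
      (if 0 < depth then (if cand = some elem then depth + 1 else depth - 1) else 1)
      hocc' invA'
    rw [hn] at key
    rw [key]
    simp [specList]

-- ===== VERDICT (by name: the statement is the Claim_ definition above) =====
theorem prefix_leader_spec : Claim_equal_prefix_leader := by
  intro seq _
  unfold Spec_prefix_leader prefix_leader
  rw [alt_eq_specList]
  have := goA_spec seq [] PySem.Dict.empty [] none 0
    (by intro x; simp)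
    ⟨le_refl 0, by intro _ x; simp, by intro h; omega⟩
  simpa using this
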